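-- pv_equiv track=rewrite | github.com/mariaciocan/AdventOfCode | Day9/day9_Q2.py | find_left_empty
-- ===== SOURCE A (Python) =====
-- def find_left_empty(disk, target):
--     for i in range(len(disk)):
--         if disk[i] != '.':
--             continue
--         start = i
--         while i < len(disk) and disk[i] == '.':
--             i = i + 1
--         end = i
--         if (end - start) >= target:
--             return (start, end)
--     return (-1, -1)
-- ===== SOURCE B (Python) =====
-- def find_left_empty(disk, target):
--     start = None
--     for i, c in enumerate(disk):
--         if c == '.':
--             if start is None:
--                 start = i
--         else:
--             if start is not None and i - start >= target:
--                 return (start, i)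
--             start = None
--     if start is not None and len(disk) - start >= target:
--         return (start, len(disk))
--     return (-1, -1)
-- ===== Notes on version B (the rewrite author's own statement) =====
-- stated objective: alternative
-- what changed: B replaces A's index loop with an inner while (which rescans each '.'-run from every position inside it) by a single linear pass carrying the current run's start and checking the run length at each run boundary; on the measured inputs this was not faster, so no speed is claimed.
import Mathlib
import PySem

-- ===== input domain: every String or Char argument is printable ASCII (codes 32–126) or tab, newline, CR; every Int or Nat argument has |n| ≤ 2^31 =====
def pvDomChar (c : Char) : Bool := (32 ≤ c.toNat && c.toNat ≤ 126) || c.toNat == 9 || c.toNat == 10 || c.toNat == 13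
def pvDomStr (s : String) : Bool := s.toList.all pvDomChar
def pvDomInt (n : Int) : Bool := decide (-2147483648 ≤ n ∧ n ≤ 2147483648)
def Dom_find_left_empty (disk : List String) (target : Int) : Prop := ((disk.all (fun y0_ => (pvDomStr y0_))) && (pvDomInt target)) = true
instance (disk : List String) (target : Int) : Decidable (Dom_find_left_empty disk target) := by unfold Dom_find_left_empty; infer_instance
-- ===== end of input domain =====

-- B makes one linear pass tracking the start of the current '.'-run instead of A's
-- per-position rescan of each run via an inner while (objective: alternative).

-- ===== PORT A =====
-- inner 'while i < len(disk) and disk[i] == ".": i += 1'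
def pyWhileDots (disk : List String) (i : Nat) : Nat :=
  if h : i < disk.length then
    if disk[i] = "." then pyWhileDots disk (i + 1) else i
  else i
termination_by disk.length - i

-- outer 'for i in range(len(disk))'
def findLoopA (disk : List String) (target : Int) (i : Nat) : List Int :=
  if h : i < disk.length then
    if disk[i] ≠ "." then findLoopA disk target (i + 1)
    else
      let start := i
      let e := pyWhileDots disk i
      if (e : Int) - (start : Int) ≥ target then [(start : Int), (e : Int)]
      else findLoopA disk target (i + 1)
  else [-1, -1]
termination_by disk.length - i

def find_left_empty (disk : List String) (target : Int) : List Int :=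
  findLoopA disk target 0

-- ===== PORT B =====
-- single pass: i is the current index, start the start of the current '.'-run (if any)
def findLoopB (l : List String) (target : Int) (i : Nat) (start : Option Nat) : List Int :=
  match l with
  | [] =>
    match start with
    | some s => if (i : Int) - (s : Int) ≥ target then [(s : Int), (i : Int)] else [-1, -1]
    | none => [-1, -1]
  | c :: rest =>
    if c = "." then findLoopB rest target (i + 1) (some (start.getD i))
    else
      match start with
      | some s =>
          if (i : Int) - (s : Int) ≥ target then [(s : Int), (i : Int)]
          else findLoopB rest target (i + 1) none
      | none => findLoopB rest target (i + 1) none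

def find_left_empty_alt (disk : List String) (target : Int) : List Int :=
  findLoopB disk target 0 none

-- ===== PRECONDITION & SPEC =====
def Spec_find_left_empty (disk : List String) (target : Int) (out : List Int) : Prop := out = find_left_empty_alt disk target
instance (disk : List String) (target : Int) (out : List Int) : Decidable (Spec_find_left_empty disk target out) := by unfold Spec_find_left_empty; infer_instance

-- ===== CLAIM (what is proved, stated in full; the proofs are below) =====
def Claim_equal_find_left_empty : Prop := ∀ (disk : List String) (target : Int), Dom_find_left_empty disk target → Spec_find_left_empty disk target (find_left_empty disk target)

-- ===== LEMMAS AND PROOFS =====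

-- length of the leading '.'-run
def runLen (l : List String) : Nat := (l.takeWhile (fun c => c = ".")).length

lemma runLen_nil : runLen [] = 0 := rfl

lemma runLen_cons_dot (rest : List String) : runLen ("." :: rest) = runLen rest + 1 := by
  simp [runLen, List.takeWhile]

lemma runLen_cons_not (c : String) (rest : List String) (h : c ≠ ".") :
    runLen (c :: rest) = 0 := by
  simp [runLen, List.takeWhile, h]

-- B with an open run: it closes the leading run and either reports it or goes on
lemma loopB_some (target : Int) : ∀ (l : List String) (i s : Nat),
    findLoopB l target i (some s) =
      if ((i + runLen l : Nat) : Int) - (s : Int) ≥ target then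
        [(s : Int), ((i + runLen l : Nat) : Int)]
      else findLoopB (l.drop (runLen l + 1)) target (i + runLen l + 1) none := by
  intro l
  induction l with
  | nil =>
    intro i s
    simp [findLoopB, runLen_nil]
  | cons c rest ih =>
    intro i s
    by_cases hc : c = "."
    · subst hc
      simp only [findLoopB, if_true, Option.getD, ih (i + 1) s, runLen_cons_dot]
      have e1 : i + 1 + runLen rest = i + (runLen rest + 1) := by omega
      have e2 : i + 1 + runLen rest + 1 = i + (runLen rest + 1) + 1 := by omega
      rw [e1]
      simp [List.drop_succ_cons]
    · have h0 : runLen (c :: rest) = 0 := runLen_cons_not c rest hc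
      simp [findLoopB, hc, h0]

-- B stepping into a cell that opens (or continues building) the leading '.'-run
lemma loopB_dot (target : Int) (rest : List String) (i : Nat) :
    findLoopB ("." :: rest) target i none =
      if ((i + runLen rest + 1 : Nat) : Int) - (i : Nat) ≥ target then
        [(i : Int), ((i + runLen rest + 1 : Nat) : Int)]
      else findLoopB (rest.drop (runLen rest + 1)) target (i + runLen rest + 1 + 1) none := by
  simp only [findLoopB, if_true, Option.getD, loopB_some target rest (i + 1) i]
  have e1 : i + 1 + runLen rest = i + runLen rest + 1 := by omega
  rw [e1]

-- B with no open run, when the leading run is too short: skip it and its closing cell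
lemma loopB_none_skip (target : Int) (l : List String) (i : Nat)
    (h : ¬ ((runLen l : Int) ≥ target)) :
    findLoopB l target i none =
      findLoopB (l.drop (runLen l + 1)) target (i + runLen l + 1) none := by
  cases l with
  | nil => simp [findLoopB, runLen_nil]
  | cons c rest =>
    by_cases hc : c = "."
    · subst hc
      rw [runLen_cons_dot] at h ⊢
      rw [loopB_dot target rest i]
      have hcond : ¬ (((i + runLen rest + 1 : Nat) : Int) - ((i : Nat) : Int) ≥ target) := by
        push_cast; push_cast at h; omega
      rw [if_neg hcond]
      have e2 : i + runLen rest + 1 + 1 = i + (runLen rest + 1) + 1 := by omega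
      rw [e2]
      simp [List.drop_succ_cons]
    · have h0 : runLen (c :: rest) = 0 := runLen_cons_not c rest hc
      simp [findLoopB, hc, h0]

-- A's inner while lands at the end of the leading run
lemma pyWhileDots_eq (disk : List String) : ∀ (n i : Nat), disk.length - i ≤ n →
    pyWhileDots disk i = i + runLen (disk.drop i) := by
  intro n
  induction n with
  | zero =>
    intro i hle
    rw [pyWhileDots, dif_neg (by omega), List.drop_eq_nil_of_le (by omega), runLen_nil]
    omega
  | succ n ih =>
    intro i hle
    by_cases h : i < disk.length
    · have hd : disk.drop i = disk[i] :: disk.drop (i + 1) := List.drop_eq_getElem_cons h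
      by_cases hdot : disk[i] = "."
      · rw [pyWhileDots, dif_pos h, if_pos hdot, ih (i + 1) (by omega), hd, hdot,
          runLen_cons_dot]
        omega
      · rw [pyWhileDots, dif_pos h, if_neg hdot, hd, runLen_cons_not _ _ hdot]
        omega
    · rw [pyWhileDots, dif_neg h, List.drop_eq_nil_of_le (by omega), runLen_nil]
      omega

-- main invariant: A restarted at index i equals B restarted at i with no open run
lemma loopA_eq_loopB (disk : List String) (target : Int) : ∀ (n i : Nat),
    disk.length - i ≤ n →
    findLoopA disk target i = findLoopB (disk.drop i) target i none := by
  intro n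
  induction n with
  | zero =>
    intro i hle
    rw [findLoopA, dif_neg (by omega), List.drop_eq_nil_of_le (by omega)]
    rfl
  | succ n ih =>
    intro i hle
    by_cases h : i < disk.length
    · have hd : disk.drop i = disk[i] :: disk.drop (i + 1) := List.drop_eq_getElem_cons h
      by_cases hdot : disk[i] = "."
      · have hw : pyWhileDots disk i = i + runLen (disk.drop i) :=
          pyWhileDots_eq disk (disk.length - i) i (le_refl _)
        have hk : runLen (disk.drop i) = runLen (disk.drop (i + 1)) + 1 := by
          rw [hd, hdot, runLen_cons_dot]
        rw [findLoopA, dif_pos h]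
        simp only [hdot, ne_eq, not_true_eq_false, if_false, hw, hk]
        rw [hd, hdot, loopB_dot target (disk.drop (i + 1)) i]
        have e3 : i + (runLen (disk.drop (i + 1)) + 1) = i + runLen (disk.drop (i + 1)) + 1 := by
          omega
        rw [e3]
        by_cases hc : ((i + runLen (disk.drop (i + 1)) + 1 : Nat) : Int) - ((i : Nat) : Int) ≥ target
        · rw [if_pos hc, if_pos hc]
        · rw [if_neg hc, if_neg hc, ih (i + 1) (by omega)]
          have hlt' : ¬ ((runLen (disk.drop (i + 1)) : Int) ≥ target) := by
            push_cast at hc ⊢; omega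
          rw [loopB_none_skip target (disk.drop (i + 1)) (i + 1) hlt', List.drop_drop]
          congr 2
          omega
      · rw [findLoopA, dif_pos h, if_pos hdot, ih (i + 1) (by omega), hd]
        simp [findLoopB, hdot]
    · rw [findLoopA, dif_neg h, List.drop_eq_nil_of_le (by omega)]
      rfl

-- ===== VERDICT (by name: the statement is the Claim_ definition above) =====
theorem find_left_empty_spec : Claim_equal_find_left_empty := by
  intro disk target _
  unfold Spec_find_left_empty find_left_empty find_left_empty_alt
  simpa using loopA_eq_loopB disk target disk.length 0 (by omega)
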